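-- pv_equiv track=rewrite | github.com/ricdigi/spotify_keychain_3D_model | utils.py | get_link_data
-- ===== SOURCE A (Python) =====
-- def get_link_data(link):
--     """
--     Returns a tuple (type, URI) parsed from the input link.
--     The type may be "track", "album", "artist", or "playlist".
--     """
--     # First, remove any query parameters
--     link = link.split('?')[0]
--
--     # Next, split the URL into parts
--     parts = link.split('/')
--
--     # Check for the presence of "track", "album", "artist", or "playlist"
--     for i, part in enumerate(parts):
--         if part in ["track", "album", "artist", "playlist"]:
--             # Check if the next part of the URL is available
--             if i + 1 < len(parts):
--                 return (part, parts[i + 1])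
--
--     # If no match is found, return None
--     return None
--
-- link = "https://open.spotify.com/intl-it/track/4R1bPIiMEr5xfejy05H7cW?si=eb7468028a9d410c"
-- ===== SOURCE B (Python) =====
-- KEYWORDS = ("track", "album", "artist", "playlist")
--
--
-- def get_link_data(link):
--     """
--     Returns a tuple (type, URI) parsed from the input link.
--     The type may be "track", "album", "artist", or "playlist".
--     """
--     s = link.split('?')[0]
--     n = len(s)
--     i = 0
--     boundary = True  # at string start or just after a '/'
--     while i < n:
--         if boundary:
--             for kw in KEYWORDS:
--                 k = len(kw)
--                 # keyword must be a whole segment followed by another segment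
--                 if s.startswith(kw, i) and i + k < n and s[i + k] == '/':
--                     j = s.find('/', i + k + 1)
--                     return (kw, s[i + k + 1: j if j != -1 else n])
--         boundary = s[i] == '/'
--         i += 1
--     return None
-- ===== Notes on version B (the rewrite author's own statement) =====
-- stated objective: alternative
-- what changed: B replaces A's split-the-URL-into-a-list-of-segments-then-enumerate scan by a single character-level scan with a segment-boundary flag that matches a keyword segment in place and slices out the following segment directly, building no intermediate list of parts.
import Mathlib
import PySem

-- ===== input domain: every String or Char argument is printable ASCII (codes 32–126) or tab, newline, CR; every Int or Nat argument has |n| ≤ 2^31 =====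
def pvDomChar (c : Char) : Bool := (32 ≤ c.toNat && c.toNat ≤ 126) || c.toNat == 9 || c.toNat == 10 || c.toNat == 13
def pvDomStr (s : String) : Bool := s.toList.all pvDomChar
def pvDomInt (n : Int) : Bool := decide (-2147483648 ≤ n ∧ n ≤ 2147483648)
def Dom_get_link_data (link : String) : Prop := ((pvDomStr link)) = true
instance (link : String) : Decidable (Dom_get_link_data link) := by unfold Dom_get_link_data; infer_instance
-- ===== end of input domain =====

-- B replaces A's split-into-a-list-of-segments-and-enumerate scan by a single character-level scan
-- with a segment-boundary flag (alternative decomposition, same return value; both programs total).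

-- s.split(sep) for a literal non-empty sep: split? is always `some`, so the getD default is never used.
def pySplit (s sep : String) : List String := (PySem.Str.split? s sep).getD []

-- ===== PORT A =====
-- 'for i, part in enumerate(parts): if part in [...]: if i + 1 < len(parts): return (part, parts[i+1])'
-- as structural recursion: membership test at each position, then look at the next element.
def aLoop : List String → Option (String × String)
  | [] => none
  | p :: rest =>
    if p ∈ ["track", "album", "artist", "playlist"] then
      match rest with
      | n :: _ => some (p, n)   -- i + 1 < len(parts)
      | [] => aLoop rest        -- keyword in last position: guard fails, loop runs off the end
    else aLoop rest

def get_link_data (link : String) : Option (String × String) :=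
  let link1 := (pySplit link "?").headD ""   -- link.split('?')[0]  ([0] total: split never returns [])
  let parts := pySplit link1 "/"
  aLoop parts

-- ===== PORT B =====
def bKeywords : List String := ["track", "album", "artist", "playlist"]

-- Source B's inner 'for kw in KEYWORDS: if s.startswith(kw, i) and … s[i+k] == "/": return (kw, <up to next '/'>)'
def tryKw (cs : List Char) : Option (String × String) :=
  match bKeywords.find? (fun kw => (kw.toList ++ ['/']).isPrefixOf cs) with
  | some kw => some (kw, String.ofList ((cs.drop (kw.toList.length + 1)).takeWhile (fun c => c ≠ '/')))
  | none => none

-- Source B's 'while i < n' scan; `atB` is its `boundary` flag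
def bScan : List Char → Bool → Option (String × String)
  | [], _ => none
  | c :: cs, atB =>
    match (if atB then tryKw (c :: cs) else none) with
    | some r => some r
    | none => bScan cs (c == '/')

def get_link_data_alt (link : String) : Option (String × String) :=
  let s := (pySplit link "?").headD ""   -- link.split('?')[0]
  bScan s.toList true

-- ===== PRECONDITION & SPEC =====
def Spec_get_link_data (link : String) (out : Option (String × String)) : Prop := out = get_link_data_alt link
instance (link : String) (out : Option (String × String)) : Decidable (Spec_get_link_data link out) := by unfold Spec_get_link_data; infer_instance

-- ===== CLAIM (what is proved, stated in full; the proofs are below) =====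
def Claim_equal_get_link_data : Prop := ∀ (link : String), Dom_get_link_data link → Spec_get_link_data link (get_link_data link)

-- ===== LEMMAS AND PROOFS =====

-- simple specification of splitting on '/': (first piece, remaining pieces)
def mySplit : List Char → List Char × List (List Char)
  | [] => ([], [])
  | c :: rest =>
    if c = '/' then ([], (mySplit rest).1 :: (mySplit rest).2)
    else (c :: (mySplit rest).1, (mySplit rest).2)

-- joining the pieces back with '/'
def joinS : List (List Char) → List Char
  | [] => []
  | s :: t => s ++ t.flatMap (fun p => '/' :: p)

lemma joinS_singleton (s : List Char) : joinS [s] = s := by simp [joinS]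

lemma joinS_cons_cons (p q : List Char) (t : List (List Char)) :
    joinS (p :: q :: t) = p ++ '/' :: joinS (q :: t) := by simp [joinS]

lemma go_spec : ∀ (fuel : Nat) (l cur : List Char) (acc : List (List Char)),
    l.length < fuel →
    PySem.Chars.splitOn.go ['/'] fuel l cur acc =
      acc.reverse ++ ((cur.reverse ++ (mySplit l).1) :: (mySplit l).2) := by
  intro fuel
  induction fuel with
  | zero => intro l cur acc h; omega
  | succ f ih =>
    intro l cur acc h
    cases l with
    | nil => simp [PySem.Chars.splitOn.go, mySplit]
    | cons c rest =>
      rw [PySem.Chars.splitOn.go]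
      by_cases hc : c = '/'
      · subst hc
        have hp : (['/'].isPrefixOf ('/' :: rest)) = true := by simp [List.isPrefixOf]
        simp only [hp, if_true, List.length_singleton, List.drop_one, List.tail_cons]
        rw [ih rest [] _ (by simpa using Nat.lt_of_succ_lt_succ h)]
        simp [mySplit]
      · have hp : (['/'].isPrefixOf (c :: rest)) = false := by
          simp [List.isPrefixOf]; exact fun h' => (hc h'.symm).elim
        simp only [hp, Bool.false_eq_true, if_false]
        rw [ih rest (c :: cur) acc (by simp at h ⊢; omega)]
        simp [mySplit, hc]

lemma splitOn_eq_mySplit (cs : List Char) :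
    PySem.Chars.splitOn cs ['/'] = (mySplit cs).1 :: (mySplit cs).2 := by
  rw [PySem.Chars.splitOn, go_spec cs.length.succ cs [] [] (Nat.lt_succ_self _)]
  simp

lemma joinS_mySplit (cs : List Char) : joinS ((mySplit cs).1 :: (mySplit cs).2) = cs := by
  induction cs with
  | nil => simp [mySplit, joinS]
  | cons c rest ih =>
    by_cases hc : c = '/'
    · subst hc
      simp only [mySplit, reduceIte]
      rw [joinS_cons_cons]
      simpa using ih
    · simp only [mySplit, if_neg hc]
      cases h2 : (mySplit rest).2 with
      | nil =>
        rw [h2] at ih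
        rw [joinS_singleton] at ih ⊢
        simpa using ih
      | cons a b =>
        rw [h2] at ih
        rw [joinS_cons_cons] at ih ⊢
        simpa using ih

lemma mySplit_noSlash (cs : List Char) :
    (∀ c ∈ (mySplit cs).1, c ≠ '/') ∧ ∀ p ∈ (mySplit cs).2, ∀ c ∈ p, c ≠ '/' := by
  induction cs with
  | nil => simp [mySplit]
  | cons c rest ih =>
    by_cases hc : c = '/'
    · subst hc
      simp only [mySplit, reduceIte]
      constructor
      · simp
      · intro p hp
        rcases List.mem_cons.mp hp with rfl | hp
        · exact ih.1
        · exact ih.2 p hp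
    · simp only [mySplit, if_neg hc]
      refine ⟨?_, ih.2⟩
      intro x hx
      rcases List.mem_cons.mp hx with rfl | hx
      · exact hc
      · exact ih.1 x hx

lemma prefix_noSlash {a b r : List Char} (ha : ∀ c ∈ a, c ≠ '/') (hb : ∀ c ∈ b, c ≠ '/')
    (h : a ++ ['/'] <+: b ++ '/' :: r) : a = b := by
  induction a generalizing b with
  | nil =>
    cases b with
    | nil => rfl
    | cons x b' =>
      exfalso
      rcases h with ⟨t, ht⟩
      simp at ht
      exact hb x (by simp) ht.1.symm
  | cons x a' ih =>
    cases b with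
    | nil =>
      exfalso
      rcases h with ⟨t, ht⟩
      simp at ht
      exact ha x (by simp) ht.1
    | cons y b' =>
      rcases h with ⟨t, ht⟩
      simp at ht
      obtain ⟨rfl, ht2⟩ := ht
      have := ih (b := b') (fun c hc => ha c (by simp [hc])) (fun c hc => hb c (by simp [hc]))
        ⟨t, by simpa using ht2⟩
      rw [this]

lemma tryKw_none {cs : List Char} (h : ∀ kw ∈ bKeywords, ¬ (kw.toList ++ ['/']) <+: cs) :
    tryKw cs = none := by
  rw [tryKw]
  rw [List.find?_eq_none.mpr]
  intro kw hkw
  simpa [List.isPrefixOf_iff_prefix] using h kw hkw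

lemma tryKw_none_of_noSlash {cs : List Char} (h : ∀ c ∈ cs, c ≠ '/') : tryKw cs = none := by
  apply tryKw_none
  intro kw _ hpre
  exact h '/' (hpre.sublist.mem (by simp)) rfl

lemma bScan_none : ∀ (cs : List Char) (flag : Bool), (∀ c ∈ cs, c ≠ '/') → bScan cs flag = none := by
  intro cs
  induction cs with
  | nil => intro flag _; rfl
  | cons c rest ih =>
    intro flag h
    rw [bScan]
    rw [tryKw_none_of_noSlash h]
    simp only [ite_self]
    exact ih _ (fun x hx => h x (by simp [hx]))

lemma takeWhile_seg {q : List Char} (t : List (List Char)) (hq : ∀ c ∈ q, c ≠ '/') :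
    (joinS (q :: t)).takeWhile (fun c => c ≠ '/') = q := by
  induction q with
  | nil =>
    cases t with
    | nil => simp [joinS]
    | cons a b => simp [joinS]
  | cons x q' ih =>
    rw [joinS] at ih ⊢
    have hx : x ≠ '/' := hq x (by simp)
    simp only [List.cons_append]
    rw [List.takeWhile_cons_of_pos (by simpa using hx)]
    rw [ih (fun c hc => hq c (by simp [hc]))]

lemma tryKw_of_mem {p : String} (hp : p ∈ bKeywords) (r : List Char) :
    tryKw (p.toList ++ '/' :: r) = some (p, String.ofList (r.takeWhile (fun c => c ≠ '/'))) := by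
  fin_cases hp <;> simp [tryKw, bKeywords, List.find?, List.isPrefixOf]

lemma kw_noSlash : ∀ kw ∈ bKeywords, ∀ c ∈ kw.toList, c ≠ '/' := by
  intro kw hkw
  simp only [bKeywords, List.mem_cons, List.not_mem_nil, or_false] at hkw
  rcases hkw with rfl | rfl | rfl | rfl <;> simp

lemma tryKw_seg_none {p : List Char} (r : List Char) (hp : ∀ c ∈ p, c ≠ '/')
    (hnp : ∀ kw ∈ bKeywords, kw.toList ≠ p) : tryKw (p ++ '/' :: r) = none := by
  apply tryKw_none
  intro kw hkw hpre
  exact hnp kw hkw (prefix_noSlash (kw_noSlash kw hkw) hp hpre)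

lemma bScan_skip : ∀ (p : List Char) (cs : List Char), (∀ c ∈ p, c ≠ '/') →
    bScan (p ++ '/' :: cs) false = bScan cs true := by
  intro p
  induction p with
  | nil =>
    intro cs _
    rw [List.nil_append, bScan]
    norm_num
  | cons x p' ih =>
    intro cs h
    rw [List.cons_append, bScan]
    simp only [Bool.false_eq_true, if_false]
    have hx : (x == '/') = false := by
      simpa using h x (by simp)
    rw [hx]
    exact ih cs (fun c hc => h c (by simp [hc]))

lemma bScan_some {cs : List Char} {r : String × String} (h : tryKw cs = some r) :
    bScan cs true = some r := by
  cases cs with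
  | nil => rw [show tryKw ([] : List Char) = none from by decide] at h; cases h
  | cons c rest => rw [bScan]; simp [h]

lemma bScan_nomatch {p : List Char} (J : List Char) (hp : ∀ c ∈ p, c ≠ '/')
    (h : tryKw (p ++ '/' :: J) = none) : bScan (p ++ '/' :: J) true = bScan J true := by
  cases p with
  | nil =>
    simp only [List.nil_append] at h ⊢
    rw [bScan, if_pos rfl, h]
    norm_num
  | cons x p' =>
    rw [List.cons_append, bScan]
    simp only [List.cons_append] at h
    rw [if_pos rfl, h]
    have hx : (x == '/') = false := by simpa using hp x (by simp)
    rw [hx]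
    exact bScan_skip p' J (fun c hc => hp c (by simp [hc]))

lemma mainLemma : ∀ (parts : List (List Char)),
    (∀ p ∈ parts, ∀ c ∈ p, c ≠ '/') →
    bScan (joinS parts) true = aLoop (parts.map String.ofList) := by
  intro parts
  induction parts with
  | nil => intro _; rfl
  | cons p t ih =>
    intro h
    cases t with
    | nil =>
      rw [joinS_singleton]
      rw [bScan_none p true (h p (by simp))]
      simp only [List.map_cons, List.map_nil]
      rw [aLoop]
      split <;> rfl
    | cons q rest =>
      rw [joinS_cons_cons]
      by_cases hmem : String.ofList p ∈ bKeywords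
      · have hp : String.ofList p ∈ (["track", "album", "artist", "playlist"] : List String) := hmem
        have htl : (String.ofList p).toList = p := String.toList_ofList
        rw [bScan_some (r := (String.ofList p, String.ofList ((joinS (q :: rest)).takeWhile (fun c => c ≠ '/'))))]
        · rw [takeWhile_seg rest (h q (by simp))]
          simp only [List.map_cons]
          rw [aLoop]
          rw [if_pos hp]
        · have := tryKw_of_mem hmem (joinS (q :: rest))
          rw [htl] at this
          exact this
      · have hne : ∀ kw ∈ bKeywords, kw.toList ≠ p := by
          intro kw hkw heq
          exact hmem (by rw [← heq, String.ofList_toList]; exact hkw)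
        rw [bScan_nomatch (joinS (q :: rest)) (h p (by simp)) (tryKw_seg_none _ (h p (by simp)) hne)]
        rw [ih (fun x hx => h x (by simp [hx]))]
        simp only [List.map_cons]
        rw [aLoop]
        rw [if_neg (show ¬ String.ofList p ∈ ["track", "album", "artist", "playlist"] from hmem)]

lemma ports_agree (link : String) : get_link_data link = get_link_data_alt link := by
  rw [get_link_data, get_link_data_alt]
  generalize ((pySplit link "?").headD "") = s
  have hsplit : pySplit s "/" = (PySem.Chars.splitOn s.toList ['/']).map String.ofList := by
    rw [pySplit, PySem.Str.split?, PySem.Chars.split?]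
    simp [show ("/" : String).toList = ['/'] from rfl]
  rw [hsplit, splitOn_eq_mySplit]
  have hns := mySplit_noSlash s.toList
  have hmain := mainLemma ((mySplit s.toList).1 :: (mySplit s.toList).2) ?_
  · rw [joinS_mySplit] at hmain
    rw [← hmain]
  · intro p hp
    rcases List.mem_cons.mp hp with rfl | hp
    · exact hns.1
    · exact hns.2 p hp

-- ===== VERDICT (by name: the statement is the Claim_ definition above) =====
theorem get_link_data_spec : Claim_equal_get_link_data := by
  intro link _
  exact ports_agree link
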